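-- pv_equiv track=rewrite | github.com/KVN-B/ISA | scripts/extract_alternatives.py | group_alt_blocks
-- ===== SOURCE A (Python) =====
-- def group_alt_blocks(blocks: list[dict], line_gap: int = 8) -> list[list[dict]]:
--     if not blocks:
--         return []
--     groups, current = [], []
--     for block in blocks:
--         if block["alt_num"] == 1:
--             if current:
--                 groups.append(current)
--             current = [block]
--         else:
--             if current and (block["line_no"] - current[-1]["line_no"]) <= line_gap:
--                 current.append(block)
--             else:
--                 if current:
--                     groups.append(current)
--                 current = [block]
--     if current:
--         groups.append(current)
--     return [g for g in groups if len({b["alt_num"] for b in g}) >= 2]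
-- ===== SOURCE B (Python) =====
-- def group_alt_blocks(blocks: list[dict], line_gap: int = 8) -> list[list[dict]]:
--     # Recursive splitting: emit each group front-to-back, carrying the previous
--     # block explicitly instead of maintaining/flushing a mutable accumulator.
--     def is_break(prev, block):
--         return block["alt_num"] == 1 or block["line_no"] - prev["line_no"] > line_gap
--
--     def split(prev, grp, rest):
--         if not rest:
--             return [grp]
--         b = rest[0]
--         if is_break(prev, b):
--             return [grp] + split(b, [b], rest[1:])
--         return split(b, grp + [b], rest[1:])
--
--     if not blocks:
--         return []
--     groups = split(blocks[0], [blocks[0]], blocks[1:])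
--     return [g for g in groups if len({b["alt_num"] for b in g}) >= 2]
-- ===== Notes on version B (the rewrite author's own statement) =====
-- stated objective: alternative
-- what changed: Replaced A's iterative maintain-and-flush accumulator (groups/current state with flush points before, inside and after the loop) by a recursive splitter that emits each group front-to-back, carrying the previous block explicitly, then applies the same distinct-alt_num filter.
import Mathlib
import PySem

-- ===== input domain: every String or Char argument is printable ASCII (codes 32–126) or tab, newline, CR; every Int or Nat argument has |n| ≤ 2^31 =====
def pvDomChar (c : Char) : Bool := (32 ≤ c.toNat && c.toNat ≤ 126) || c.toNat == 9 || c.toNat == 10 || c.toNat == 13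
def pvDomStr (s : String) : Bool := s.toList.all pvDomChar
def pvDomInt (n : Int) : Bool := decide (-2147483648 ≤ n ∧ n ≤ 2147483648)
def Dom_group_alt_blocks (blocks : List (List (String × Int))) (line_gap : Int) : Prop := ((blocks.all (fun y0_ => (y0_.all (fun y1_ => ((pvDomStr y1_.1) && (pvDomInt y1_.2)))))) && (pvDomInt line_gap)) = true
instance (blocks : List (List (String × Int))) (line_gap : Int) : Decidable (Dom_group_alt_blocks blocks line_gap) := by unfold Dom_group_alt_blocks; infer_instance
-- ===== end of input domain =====

-- ===== PORT A =====
-- Header: B replaces A's maintain-and-flush accumulator loop by a recursive splitter that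
-- emits each group front-to-back, carrying the previous block explicitly (objective: alternative).
-- Both ports read dict keys via PySem.Dict.get?; Pre_ guarantees both keys exist (Python
-- raises KeyError otherwise), so the `.getD 0` default is never used inside Pre_.

def pvAltNum (b : List (String × Int)) : Int := (PySem.Dict.get? (PySem.Dict.mk b) "alt_num").getD 0
def pvLineNo (b : List (String × Int)) : Int := (PySem.Dict.get? (PySem.Dict.mk b) "line_no").getD 0
-- Python's `len({b["alt_num"] for b in g}) >= 2` (identical expression in both sources)
def pvKeep (g : List (List (String × Int))) : Bool := decide (2 ≤ (PySem.Set.ofList (g.map pvAltNum)).length)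

-- A's for-loop over blocks, state (groups, current)
def pvALoop (line_gap : Int) (groups : List (List (List (String × Int)))) (current : List (List (String × Int))) :
    List (List (String × Int)) → List (List (List (String × Int))) × List (List (String × Int))
  | [] => (groups, current)
  | block :: rest =>
    if pvAltNum block = 1 then
      pvALoop line_gap (if current ≠ [] then groups ++ [current] else groups) [block] rest
    else
      if current ≠ [] ∧ pvLineNo block - pvLineNo ((current.getLast?).getD []) ≤ line_gap then
        pvALoop line_gap groups (current ++ [block]) rest
      else
        pvALoop line_gap (if current ≠ [] then groups ++ [current] else groups) [block] rest

def group_alt_blocks (blocks : List (List (String × Int))) (line_gap : Int) : List (List (List (String × Int))) :=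
  if blocks = [] then []
  else
    let r := pvALoop line_gap [] [] blocks
    (if r.2 ≠ [] then r.1 ++ [r.2] else r.1).filter pvKeep

-- ===== PORT B =====
def pvIsBreak (line_gap : Int) (prev block : List (String × Int)) : Bool :=
  pvAltNum block == 1 || decide (line_gap < pvLineNo block - pvLineNo prev)

def pvSplit (line_gap : Int) (prev : List (String × Int)) (grp : List (List (String × Int))) :
    List (List (String × Int)) → List (List (List (String × Int)))
  | [] => [grp]
  | b :: rest =>
    if pvIsBreak line_gap prev b then
      grp :: pvSplit line_gap b [b] rest
    else
      pvSplit line_gap b (grp ++ [b]) rest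

def group_alt_blocks_alt (blocks : List (List (String × Int))) (line_gap : Int) : List (List (List (String × Int))) :=
  match blocks with
  | [] => []
  | b0 :: rest => (pvSplit line_gap b0 [b0] rest).filter pvKeep

-- ===== PRECONDITION & SPEC =====
-- Pre_ excludes exactly the inputs where the Python A raises KeyError: some block lacks
-- "alt_num", or a non-first block whose alt_num ≠ 1 makes Python read "line_no" of itself
-- and of its predecessor (short-circuiting skips "line_no" everywhere else).
def Pre_group_alt_blocks (blocks : List (List (String × Int))) (line_gap : Int) : Prop :=
  (∀ b ∈ blocks, (PySem.Dict.get? (PySem.Dict.mk b) "alt_num").isSome = true) ∧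
  (∀ p ∈ blocks.zip blocks.tail,
     PySem.Dict.get? (PySem.Dict.mk p.2) "alt_num" ≠ some 1 →
       (PySem.Dict.get? (PySem.Dict.mk p.1) "line_no").isSome = true ∧
       (PySem.Dict.get? (PySem.Dict.mk p.2) "line_no").isSome = true)
instance (blocks : List (List (String × Int))) (line_gap : Int) : Decidable (Pre_group_alt_blocks blocks line_gap) := by
  unfold Pre_group_alt_blocks; infer_instance

def pvWitness_group_alt_blocks : (List (List (String × Int))) × Int :=
  ([[("alt_num", 1), ("line_no", 3)], [("alt_num", 2), ("line_no", 5)]], 8)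

def Spec_group_alt_blocks (blocks : List (List (String × Int))) (line_gap : Int) (out : List (List (List (String × Int)))) : Prop := out = group_alt_blocks_alt blocks line_gap
instance (blocks : List (List (String × Int))) (line_gap : Int) (out : List (List (List (String × Int)))) : Decidable (Spec_group_alt_blocks blocks line_gap out) := by unfold Spec_group_alt_blocks; infer_instance

-- ===== CLAIM (what is proved, stated in full; the proofs are below) =====
def Claim_equal_group_alt_blocks : Prop := ∀ (blocks : List (List (String × Int))) (line_gap : Int), Dom_group_alt_blocks blocks line_gap → Pre_group_alt_blocks blocks line_gap → Spec_group_alt_blocks blocks line_gap (group_alt_blocks blocks line_gap)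

-- ===== LEMMAS AND PROOFS =====

-- Main invariant: A's loop, run from a nonempty `current` whose last element is `prev`,
-- ends with a nonempty current and flushes exactly the groups B's splitter produces.
theorem pvALoop_eq_split (line_gap : Int) :
    ∀ (rest : List (List (String × Int))) groups current (prev : List (String × Int)),
      current.getLast? = some prev →
      (pvALoop line_gap groups current rest).2 ≠ [] ∧
      (pvALoop line_gap groups current rest).1 ++ [(pvALoop line_gap groups current rest).2]
        = groups ++ pvSplit line_gap prev current rest := by
  intro rest
  induction rest with
  | nil =>
    intro groups current prev h
    have hne : current ≠ [] := by rintro rfl; simp at h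
    simp [pvALoop, pvSplit, hne]
  | cons b rest ih =>
    intro groups current prev h
    have hne : current ≠ [] := by rintro rfl; simp at h
    have hp : (current.getLast?).getD [] = prev := by rw [h]; rfl
    by_cases h1 : pvAltNum b = 1
    · have := ih (groups ++ [current]) [b] b (by simp)
      simp only [pvALoop, pvSplit, pvIsBreak, h1, hne, ne_eq, not_false_iff,
        beq_self_eq_true, Bool.true_or, if_pos]
      exact ⟨this.1, by rw [this.2]; simp⟩
    · by_cases h2 : pvLineNo b - pvLineNo ((current.getLast?).getD []) ≤ line_gap
      · have hbr : pvIsBreak line_gap prev b = false := by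
          rw [hp] at h2; simp [pvIsBreak, h1]; omega
        have := ih groups (current ++ [b]) b (by simp)
        simp only [pvALoop, pvSplit, h1, hne, h2, hbr, ne_eq, not_false_iff,
          and_true, if_true, if_false, Bool.false_eq_true]
        exact this
      · have hbr : pvIsBreak line_gap prev b = true := by
          rw [hp] at h2; simp [pvIsBreak, h1]; omega
        have := ih (groups ++ [current]) [b] b (by simp)
        simp only [pvALoop, pvSplit, h1, hne, h2, hbr, ne_eq, not_false_iff,
          and_false, if_false, if_pos]
        exact ⟨this.1, by rw [this.2]; simp⟩

-- The first iteration of A's loop (empty current) always sets current = [block].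
theorem pvALoop_first (line_gap : Int) (b : List (String × Int)) (rest : List (List (String × Int))) :
    pvALoop line_gap [] [] (b :: rest) = pvALoop line_gap [] [b] rest := by
  by_cases h1 : pvAltNum b = 1 <;> simp [pvALoop, h1]

-- ===== VERDICT (by name: the statement is the Claim_ definition above) =====
theorem group_alt_blocks_spec : Claim_equal_group_alt_blocks := by
  intro blocks line_gap _ _
  unfold Spec_group_alt_blocks group_alt_blocks group_alt_blocks_alt
  match blocks with
  | [] => simp
  | b0 :: rest =>
    simp only [reduceCtorEq, if_false]
    rw [pvALoop_first]
    obtain ⟨hne, heq⟩ := pvALoop_eq_split line_gap rest [] [b0] b0 (by simp)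
    simp only [hne, ne_eq, not_false_iff, if_pos]
    rw [heq]
    simp
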